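-- pv_equiv track=rewrite | github.com/fradriz/fr_utils | a_python/apps/lambda_function.py | remove_reserved_chars
-- ===== SOURCE A (Python) =====
-- def remove_reserved_chars(dict_file):
--     chars_to_remove = "'{\"}`"
--     fields_to_check = ["clientIndustry", "modelDescription", "modelName", "processEmail"]
--
--     for key in dict_file:
--         if type(dict_file[key]) is str and key in fields_to_check:
--             for rem in chars_to_remove:
--                 dict_file[key] = dict_file[key].replace(rem, " ")
--
--     return dict_file
-- ===== SOURCE B (Python) =====
-- def remove_reserved_chars(dict_file):
--     reserved = set("'{\"}`")
--     for field in ("clientIndustry", "modelDescription", "modelName", "processEmail"):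
--         value = dict_file.get(field)
--         if type(value) is str:
--             dict_file[field] = "".join(" " if ch in reserved else ch for ch in value)
--     return dict_file
-- ===== Notes on version B (the rewrite author's own statement) =====
-- stated objective: alternative
-- what changed: B iterates the fixed four-field list with direct dict lookups and cleans each value in a single per-character translate pass, instead of A's scan over every dict key with a list-membership test and five sequential str.replace passes.
import Mathlib
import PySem

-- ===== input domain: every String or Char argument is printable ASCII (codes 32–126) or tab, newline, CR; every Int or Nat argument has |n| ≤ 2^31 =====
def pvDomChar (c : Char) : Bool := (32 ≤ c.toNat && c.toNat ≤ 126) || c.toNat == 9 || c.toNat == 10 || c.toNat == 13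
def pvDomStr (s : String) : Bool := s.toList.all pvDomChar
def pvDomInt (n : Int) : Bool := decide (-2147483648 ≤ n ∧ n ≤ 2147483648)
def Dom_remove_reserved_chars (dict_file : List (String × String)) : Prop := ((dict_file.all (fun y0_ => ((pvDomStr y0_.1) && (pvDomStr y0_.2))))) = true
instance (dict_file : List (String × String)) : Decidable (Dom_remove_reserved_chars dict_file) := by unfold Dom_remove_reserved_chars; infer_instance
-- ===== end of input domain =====

-- B cleans the four fixed fields by direct lookup with a one-pass character translate, instead of A's
-- scan over all keys with five sequential replaces (alternative decomposition; both mutate the dict in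
-- place in Python the same way — the equivalence proved here is about the returned dict's contents).

-- ===== PORT A =====
-- A iterates the dict's keys and reassigns dict_file[key] in place; on an assoc list with unique keys
-- (a Python dict) that is exactly a map over the pairs. The `type(dict_file[key]) is str` test is
-- always true here since every value is a String.
def pvCleanA (s : String) : String :=
  (['\'', '{', '"', '}', '`']).foldl
    (fun acc rem => PySem.Str.replace acc (String.ofList [rem]) " ") s

def remove_reserved_chars (dict_file : List (String × String)) : List (String × String) :=
  dict_file.map (fun kv =>
    if ["clientIndustry", "modelDescription", "modelName", "processEmail"].contains kv.1 then
      (kv.1, pvCleanA kv.2)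
    else kv)

-- ===== PORT B =====
-- "".join(" " if ch in reserved else ch for ch in value)
def pvTrB (c : Char) : Char := if (['\'', '{', '"', '}', '`']).contains c then ' ' else c

def pvCleanB (s : String) : String := String.ofList (s.toList.map pvTrB)

-- dict_file.get(field): first match in the assoc list
def pvGetB : List (String × String) → String → Option String
  | [], _ => none
  | (k, v) :: rest, f => if k = f then some v else pvGetB rest f

-- dict_file[field] = x for an existing key: overwrite the first matching pair in place
def pvSetB : List (String × String) → String → String → List (String × String)
  | [], _, _ => []
  | (k, v) :: rest, f, x => if k = f then (k, x) :: rest else (k, v) :: pvSetB rest f x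

def pvStepB (d : List (String × String)) (field : String) : List (String × String) :=
  match pvGetB d field with
  | none => d
  | some v => pvSetB d field (pvCleanB v)

def remove_reserved_chars_alt (dict_file : List (String × String)) : List (String × String) :=
  ["clientIndustry", "modelDescription", "modelName", "processEmail"].foldl pvStepB dict_file

-- ===== PRECONDITION & SPEC =====
-- Pre_ only restricts the assoc list to unique keys — the lists that represent a Python dict; a Python
-- dict can never carry a duplicate key, so no input the Python A accepts is excluded.
def Pre_remove_reserved_chars (dict_file : List (String × String)) : Prop :=
  (dict_file.map Prod.fst).Nodup
instance (dict_file : List (String × String)) : Decidable (Pre_remove_reserved_chars dict_file) := by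
  unfold Pre_remove_reserved_chars; infer_instance

def pvWitness_remove_reserved_chars : (List (String × String)) :=
  [("modelName", "a'b{c}"), ("other", "'x")]

def Spec_remove_reserved_chars (dict_file : List (String × String)) (out : List (String × String)) : Prop := out = remove_reserved_chars_alt dict_file
instance (dict_file : List (String × String)) (out : List (String × String)) : Decidable (Spec_remove_reserved_chars dict_file out) := by unfold Spec_remove_reserved_chars; infer_instance

-- ===== CLAIM (what is proved, stated in full; the proofs are below) =====
def Claim_equal_remove_reserved_chars : Prop := ∀ (dict_file : List (String × String)), Dom_remove_reserved_chars dict_file → Pre_remove_reserved_chars dict_file → Spec_remove_reserved_chars dict_file (remove_reserved_chars dict_file)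

-- ===== LEMMAS AND PROOFS =====

-- single-character replace is a pointwise map
theorem pv_go_single (c d : Char) : ∀ (fuel : Nat) (l acc : List Char), l.length ≤ fuel →
    PySem.Chars.replace.go [c] [d] fuel l acc = acc.reverse ++ l.map (fun x => if x = c then d else x) := by
  intro fuel
  induction fuel with
  | zero => intro l acc h; rw [PySem.Chars.replace.go]; simp at h; simp [h]
  | succ n ih =>
    intro l acc h
    cases l with
    | nil => rw [PySem.Chars.replace.go]; simp; omega
    | cons c' t =>
      rw [PySem.Chars.replace.go]
      simp only [List.isPrefixOf]
      by_cases hc : c = c'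
      · subst hc
        simp only [beq_self_eq_true, Bool.true_and, if_pos]
        rw [ih]
        · simp
        · simpa using Nat.le_of_succ_le_succ h
      · have hb : (c == c') = false := by simp [hc]
        simp only [hb, Bool.false_and, Bool.false_eq_true, if_neg, not_false_iff]
        rw [ih]
        · simp [Ne.symm hc]
        · simpa using Nat.le_of_succ_le_succ h

theorem pv_replace_single (c d : Char) (s : List Char) :
    PySem.Chars.replace s [c] [d] = s.map (fun x => if x = c then d else x) := by
  rw [PySem.Chars.replace]
  simp only [List.isEmpty_cons, Bool.false_eq_true, if_neg, not_false_iff]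
  rw [pv_go_single c d s.length s [] le_rfl]
  simp

theorem pv_strReplace_single (c d : Char) (s : String) :
    PySem.Str.replace s (String.ofList [c]) (String.ofList [d]) =
      String.ofList (s.toList.map (fun x => if x = c then d else x)) := by
  rw [PySem.Str.replace]
  simp only [String.toList_ofList]
  rw [pv_replace_single]

theorem pv_cleanA_eq_cleanB (s : String) : pvCleanA s = pvCleanB s := by
  have h : (" " : String) = String.ofList [' '] := rfl
  rw [pvCleanA, pvCleanB]
  simp only [List.foldl_cons, List.foldl_nil, h, pv_strReplace_single]
  simp only [String.toList_ofList, List.map_map]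
  congr 1
  apply List.map_congr_left
  intro x _
  simp only [Function.comp, pvTrB, List.contains_cons]
  by_cases h1 : x = '\'' <;> by_cases h2 : x = '{' <;> by_cases h3 : x = '"' <;>
    by_cases h4 : x = '}' <;> by_cases h5 : x = '`' <;> simp_all

-- the per-pair update B performs on the field f
def pvUpd (f : String) (kv : String × String) : String × String :=
  if kv.1 = f then (kv.1, pvCleanB kv.2) else kv

theorem pv_get_none_iff (d : List (String × String)) (f : String) :
    pvGetB d f = none ↔ f ∉ d.map Prod.fst := by
  induction d with
  | nil => simp [pvGetB]
  | cons kv rest ih =>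
    obtain ⟨k, v⟩ := kv
    by_cases h : k = f
    · subst h; simp [pvGetB]
    · simp only [pvGetB, if_neg h, List.map_cons, List.mem_cons]
      rw [ih]
      simp [Ne.symm h]

theorem pv_map_upd_id (d : List (String × String)) (f : String) (h : f ∉ d.map Prod.fst) :
    d.map (pvUpd f) = d := by
  induction d with
  | nil => rfl
  | cons kv rest ih =>
    simp only [List.map_cons, List.mem_cons, not_or] at h ⊢
    obtain ⟨h1, h2⟩ := h
    rw [ih h2]
    simp [pvUpd, Ne.symm h1]

theorem pv_step_eq_map (d : List (String × String)) (f : String)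
    (h : (d.map Prod.fst).Nodup) : pvStepB d f = d.map (pvUpd f) := by
  induction d with
  | nil => rfl
  | cons kv rest ih =>
    obtain ⟨k, v⟩ := kv
    simp only [List.map_cons, List.nodup_cons] at h
    obtain ⟨hk, hrest⟩ := h
    by_cases hkf : k = f
    · subst hkf
      simp only [pvStepB, pvGetB, pvSetB, List.map_cons]
      rw [pv_map_upd_id rest k hk]
      simp [pvUpd]
    · have hget : pvGetB ((k, v) :: rest) f = pvGetB rest f := by simp [pvGetB, hkf]
      cases hg : pvGetB rest f with
      | none =>
        simp only [pvStepB, hget, hg, List.map_cons]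
        rw [pv_map_upd_id rest f ((pv_get_none_iff rest f).mp hg)]
        simp [pvUpd, hkf]
      | some w =>
        have hstep : pvStepB rest f = pvSetB rest f (pvCleanB w) := by
          simp [pvStepB, hg]
        simp only [pvStepB, hget, hg, pvSetB, if_neg hkf, List.map_cons]
        rw [← hstep, ih hrest]
        simp [pvUpd, hkf]

theorem pv_upd_keys (d : List (String × String)) (f : String) :
    (d.map (pvUpd f)).map Prod.fst = d.map Prod.fst := by
  induction d with
  | nil => rfl
  | cons kv rest ih =>
    simp only [List.map_cons, ih]
    by_cases h : kv.1 = f <;> simp [pvUpd, h]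

-- ===== VERDICT (by name: the statement is the Claim_ definition above) =====
theorem remove_reserved_chars_spec : Claim_equal_remove_reserved_chars := by
  intro d _ hpre
  unfold Spec_remove_reserved_chars remove_reserved_chars remove_reserved_chars_alt
  unfold Pre_remove_reserved_chars at hpre
  simp only [List.foldl_cons, List.foldl_nil]
  have h2 : ((d.map (pvUpd "clientIndustry")).map Prod.fst).Nodup := by
    rw [pv_upd_keys]; exact hpre
  have h3 : (((d.map (pvUpd "clientIndustry")).map (pvUpd "modelDescription")).map Prod.fst).Nodup := by
    rw [pv_upd_keys, pv_upd_keys]; exact hpre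
  have h4 : ((((d.map (pvUpd "clientIndustry")).map (pvUpd "modelDescription")).map (pvUpd "modelName")).map Prod.fst).Nodup := by
    rw [pv_upd_keys, pv_upd_keys, pv_upd_keys]; exact hpre
  rw [pv_step_eq_map d "clientIndustry" hpre]
  rw [pv_step_eq_map (d.map (pvUpd "clientIndustry")) "modelDescription" h2]
  rw [pv_step_eq_map ((d.map (pvUpd "clientIndustry")).map (pvUpd "modelDescription")) "modelName" h3]
  rw [pv_step_eq_map _ "processEmail" h4]
  simp only [List.map_map]
  apply List.map_congr_left
  intro kv _
  obtain ⟨k, v⟩ := kv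
  simp only [Function.comp, pvUpd, List.contains_cons]
  by_cases h1 : k = "clientIndustry" <;> by_cases h2 : k = "modelDescription" <;>
    by_cases h3 : k = "modelName" <;> by_cases h4 : k = "processEmail" <;>
      simp_all [pv_cleanA_eq_cleanB]
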